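-- pv_equiv track=rewrite | github.com/Hidenver2016/Leetcode | Python3.6/294-Py3-Flip Game II.py | canWin
-- ===== SOURCE A (Python) =====
-- def canWin(s):
--     memo = {}
--     def can(s):
--         if s not in memo:
--             memo[s] = any(s[i:i+2] == '++' and not can(s[:i] + '-' + s[i+2:])
--                           for i in range(len(s)))
--         return memo[s]
--     return can(s)
-- ===== SOURCE B (Python) =====
-- def canWin(s):
--     # Sprague-Grundy: split into runs of '+', grundy per run length, XOR; win iff nonzero.
--     runs, cur = [], 0
--     for c in s:
--         if c == '+':
--             cur += 1
--         else:
--             runs.append(cur)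
--             cur = 0
--     runs.append(cur)
--     m = max(runs)
--     g = [0] * (m + 1)
--     for n in range(2, m + 1):
--         seen = {g[a] ^ g[n - 2 - a] for a in range(n - 1)}
--         v = 0
--         while v in seen:
--             v += 1
--         g[n] = v
--     x = 0
--     for r in runs:
--         x ^= g[r]
--     return x != 0
-- ===== Notes on version B (the rewrite author's own statement) =====
-- stated objective: alternative
-- what changed: A's memoized game-tree search over whole strings is replaced by Sprague-Grundy theory: split the board into runs of plus signs, compute each run length's Grundy number by a mex dynamic program, and the first player wins iff the XOR of the runs' Grundy numbers is nonzero.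
import Mathlib
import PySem

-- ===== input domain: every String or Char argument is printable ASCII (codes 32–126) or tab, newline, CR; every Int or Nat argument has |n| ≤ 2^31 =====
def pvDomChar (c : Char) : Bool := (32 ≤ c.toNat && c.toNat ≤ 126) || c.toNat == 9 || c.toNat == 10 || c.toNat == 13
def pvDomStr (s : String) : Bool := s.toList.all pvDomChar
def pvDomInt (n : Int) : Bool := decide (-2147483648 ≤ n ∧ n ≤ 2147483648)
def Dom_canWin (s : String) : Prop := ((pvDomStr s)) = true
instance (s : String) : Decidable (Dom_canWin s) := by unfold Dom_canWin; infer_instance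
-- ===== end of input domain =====

-- B replaces A's memoized game-tree search over strings by the Sprague-Grundy computation
-- (grundy number per run length of plus signs, XOR, first player wins iff nonzero); same value on every input.

-- ===== PORT A =====
-- helper lemma used only by the ports' termination proofs
theorem pv_le_foldr_max {v : Nat} : ∀ {l : List Nat}, v ∈ l → v ≤ l.foldr max 0 := by
  intro l hv
  induction l with
  | nil => cases hv
  | cons a t ih =>
    rcases List.mem_cons.mp hv with rfl | hv
    · simp [List.foldr]
    · have := ih hv
      simp [List.foldr]
      omega

-- A: memoized recursive search; memo is threaded explicitly (Python dict mutation).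
mutual
def canA (l : List Char) (memo : PySem.Dict (List Char) Bool) :
    Bool × PySem.Dict (List Char) Bool :=
  match PySem.Dict.get? memo l with
  | some b => (b, memo)
  | none =>
    let p := anyA l 0 memo
    (p.1, PySem.Dict.insert p.2 l p.1)
  termination_by (l.length, 1, 0)
  decreasing_by
    exact Prod.Lex.right _ (Prod.Lex.left _ _ (by omega))

-- the generator `any(s[i:i+2] == '++' and not can(...) for i in range(len(s)))`, short-circuiting
def anyA (l : List Char) (i : Nat) (memo : PySem.Dict (List Char) Bool) :
    Bool × PySem.Dict (List Char) Bool :=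
  if h : i < l.length then
    if hs : PySem.List.slice l (some (i : Int)) (some ((i : Int) + 2)) = ['+', '+'] then
      let q := canA (PySem.List.slice l none (some (i : Int)) ++
                      '-' :: PySem.List.slice l (some ((i : Int) + 2)) none) memo
      if q.1 then anyA l (i + 1) q.2 else (true, q.2)
    else anyA l (i + 1) memo
  else (false, memo)
  termination_by (l.length, 0, l.length - i)
  decreasing_by
    · have hc : ((i : Int) + 2) = ((i + 2 : Nat) : Int) := by push_cast; ring
      rw [hc, PySem.List.slice_natCast] at hs
      have hi2 : i + 2 ≤ l.length := by
        have h2 := congrArg List.length hs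
        simp only [List.length_take, List.length_drop, List.length_cons, List.length_nil] at h2
        omega
      rw [hc, PySem.List.slice_to_natCast, PySem.List.slice_from_natCast]
      apply Prod.Lex.left
      simp only [List.length_append, List.length_cons, List.length_drop, List.length_take]
      omega
    · exact Prod.Lex.right _ (Prod.Lex.right _ (by omega))
    · exact Prod.Lex.right _ (Prod.Lex.right _ (by omega))
end

def canWin (s : String) : Bool := (canA s.toList PySem.Dict.empty).1

-- ===== PORT B =====
-- `while v in seen: v += 1`
def mexFrom (seen : List Nat) (v : Nat) : Nat :=
  if h : v ∈ seen then mexFrom seen (v + 1) else v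
termination_by seen.foldr max 0 + 1 - v
decreasing_by have := pv_le_foldr_max h; omega

def canWin_alt (s : String) : Bool :=
  -- run lengths of '+' (zeros included, as in Source B)
  let rc := s.toList.foldl
      (fun (p : List Nat × Nat) c => if c == '+' then (p.1, p.2 + 1) else (p.1 ++ [p.2], 0))
      ([], 0)
  let rs := rc.1 ++ [rc.2]
  let m := (PySem.List.max? rs (fun x => x)).getD 0   -- rs is provably nonempty, so the default is unreachable
  -- grundy table g[0..m] by dynamic programming
  let g := (List.range' 2 (m - 1)).foldl
      (fun g n =>
        let seen := PySem.Set.ofList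
          ((List.range (n - 1)).map fun a => (g.getD a 0) ^^^ (g.getD (n - 2 - a) 0))
        g.set n (mexFrom seen 0))
      (List.replicate (m + 1) 0)
  decide ((rs.foldl (fun x r => x ^^^ g.getD r 0) 0) ≠ 0)

-- ===== PRECONDITION & SPEC =====
def Spec_canWin (s : String) (out : Bool) : Prop := out = canWin_alt s
instance (s : String) (out : Bool) : Decidable (Spec_canWin s out) := by unfold Spec_canWin; infer_instance

-- ===== CLAIM (what is proved, stated in full; the proofs are below) =====
def Claim_equal_canWin : Prop := ∀ (s : String), Dom_canWin s → Spec_canWin s (canWin s)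

-- ===== LEMMAS AND PROOFS =====

-- the pure game on strings
def nextL (l : List Char) (i : Nat) : List Char := l.take i ++ '-' :: l.drop (i + 2)

def movable (l : List Char) (i : Nat) : Bool := l[i]? == some '+' && l[i + 1]? == some '+'

theorem movable_lt {l : List Char} {i : Nat} (h : movable l i = true) : i + 1 < l.length := by
  simp [movable] at h
  have := h.2
  have : l[i+1]? = some '+' := this
  obtain ⟨h2, -⟩ := List.getElem?_eq_some_iff.mp this
  omega

theorem nextL_length {l : List Char} {i : Nat} (h : i + 1 < l.length) :
    (nextL l i).length + 1 = l.length := by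
  simp [nextL]
  omega

def W (l : List Char) : Bool :=
  (List.range l.length).attach.any fun ⟨i, hi⟩ =>
    if h : movable l i = true then !W (nextL l i) else false
termination_by l.length
decreasing_by
  have := movable_lt h
  have := nextL_length this
  omega

-- run lengths of '+', zeros included (one run per maximal block, length 0 between/at ends)
def runs : List Char → List Nat
  | [] => [0]
  | c :: t => if c = '+' then
      match runs t with
      | r :: rs => (r + 1) :: rs
      | [] => [1]
    else 0 :: runs t

-- the segment game: split a run k ≥ 2 at offset a into a and k-2-a
def segNext (rs : List Nat) (j a : Nat) : List Nat :=
  rs.take j ++ a :: (rs.getD j 0 - 2 - a) :: rs.drop (j + 1)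

def LW (rs : List Nat) : Bool :=
  (List.range rs.length).attach.any fun ⟨j, hj⟩ =>
    (List.range (rs.getD j 0 - 1)).attach.any fun ⟨a, ha⟩ =>
      if h : (segNext rs j a).sum < rs.sum then !LW (segNext rs j a) else false
termination_by rs.sum
decreasing_by exact h

-- grundy numbers
def g (n : Nat) : Nat :=
  mexFrom ((List.range (n - 1)).attach.map fun a => g a.1 ^^^ g (n - 2 - a.1)) 0
termination_by n
decreasing_by
  · have := a.2; simp [List.mem_range] at this; omega
  · have := a.2; simp [List.mem_range] at this; omega

def gmoves (n : Nat) : List Nat := (List.range (n - 1)).map fun a => g a ^^^ g (n - 2 - a)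

def xorg (rs : List Nat) : Nat := rs.foldr (fun k x => g k ^^^ x) 0

def goodM (m : PySem.Dict (List Char) Bool) : Prop :=
  ∀ t b, PySem.Dict.get? m t = some b → b = W t

theorem g_eq (n : Nat) : g n = mexFrom (gmoves n) 0 := by
  rw [g, gmoves]
  exact congrArg (fun s => mexFrom s 0)
    (List.attach_map_val (l := List.range (n - 1)) (f := fun x => g x ^^^ g (n - 2 - x)))

-- mexFrom seen v is the least w ≥ v with w ∉ seen
theorem mexFrom_spec (seen : List Nat) (v : Nat) :
    mexFrom seen v ∉ seen ∧ v ≤ mexFrom seen v ∧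
      (∀ w, v ≤ w → w < mexFrom seen v → w ∈ seen) := by
  induction v using mexFrom.induct seen with
  | case1 v h ih =>
    rw [mexFrom, dif_pos h]
    refine ⟨ih.1, by omega, ?_⟩
    intro w hw hw2
    rcases Nat.eq_or_lt_of_le hw with rfl | hlt
    · exact h
    · exact ih.2.2 w hlt hw2
  | case2 v h =>
    rw [mexFrom, dif_neg h]
    exact ⟨h, le_refl _, fun w hw hw2 => absurd (lt_of_le_of_lt hw hw2) (lt_irrefl _)⟩

theorem mexFrom_congr (s s' : List Nat) (hss : ∀ x, x ∈ s ↔ x ∈ s') (v : Nat) :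
    mexFrom s v = mexFrom s' v := by
  obtain ⟨h1, h2, h3⟩ := mexFrom_spec s v
  obtain ⟨h1', h2', h3'⟩ := mexFrom_spec s' v
  by_contra hne
  rcases Nat.lt_or_ge (mexFrom s v) (mexFrom s' v) with h | h
  · exact h1 ((hss _).mpr (h3' _ h2 h))
  · have h' : mexFrom s' v < mexFrom s v := by omega
    exact h1' ((hss _).mp (h3 _ h2' h'))

theorem mem_gmoves {n t : Nat} :
    t ∈ gmoves n ↔ ∃ a, a < n - 1 ∧ g a ^^^ g (n - 2 - a) = t := by
  simp [gmoves, List.mem_map, List.mem_range]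

theorem g_not_mem_gmoves (n : Nat) : g n ∉ gmoves n := by
  rw [g_eq]; exact (mexFrom_spec (gmoves n) 0).1

theorem lt_g_mem_gmoves {n t : Nat} (h : t < g n) : t ∈ gmoves n := by
  rw [g_eq] at h
  exact (mexFrom_spec (gmoves n) 0).2.2 t (Nat.zero_le _) h

-- xor juggling
theorem xor_left_comm (a b c : Nat) : a ^^^ (b ^^^ c) = b ^^^ (a ^^^ c) := by
  rw [← Nat.xor_assoc, Nat.xor_comm a b, Nat.xor_assoc]

theorem xorg_cons (k : Nat) (rs : List Nat) : xorg (k :: rs) = g k ^^^ xorg rs := rfl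

theorem xorg_append (xs ys : List Nat) : xorg (xs ++ ys) = xorg xs ^^^ xorg ys := by
  induction xs with
  | nil => simp [xorg]
  | cons a t ih => simp [xorg, List.foldr] at ih ⊢; rw [ih, Nat.xor_assoc]

def validMove (rs : List Nat) (j a : Nat) : Prop := j < rs.length ∧ a < rs.getD j 0 - 1

theorem rs_decomp {rs : List Nat} {j : Nat} (hj : j < rs.length) :
    rs = rs.take j ++ rs.getD j 0 :: rs.drop (j + 1) := by
  rw [List.getD_eq_getElem?_getD, List.getElem?_eq_getElem hj]
  conv_lhs => rw [← List.take_append_drop j rs]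
  rw [List.drop_eq_getElem_cons hj]
  simp

theorem seg_sum {rs : List Nat} {j a : Nat} (h : validMove rs j a) :
    (segNext rs j a).sum + 2 = rs.sum := by
  obtain ⟨hj, ha⟩ := h
  conv_rhs => rw [rs_decomp hj]
  simp [segNext, List.sum_append, List.getD_eq_getElem?_getD] at ha ⊢
  omega

theorem xor_cancel (a b : Nat) : a ^^^ (a ^^^ b) = b := by
  rw [← Nat.xor_assoc, Nat.xor_self, Nat.zero_xor]

theorem seg_xorg {rs : List Nat} {j a : Nat} (h : validMove rs j a) :
    xorg (segNext rs j a) =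
      xorg rs ^^^ g (rs.getD j 0) ^^^ (g a ^^^ g (rs.getD j 0 - 2 - a)) := by
  obtain ⟨hj, ha⟩ := h
  have hdec := rs_decomp hj
  set K := rs.getD j 0 with hK
  have hrs : xorg rs = xorg (rs.take j) ^^^ (g K ^^^ xorg (rs.drop (j + 1))) := by
    conv_lhs => rw [hdec]
    rw [xorg_append, xorg_cons]
  rw [segNext, ← hK, xorg_append, xorg_cons, xorg_cons, hrs]
  -- pure xor algebra
  simp only [Nat.xor_assoc, Nat.xor_comm, xor_left_comm, xor_cancel]

theorem LW_iff (rs : List Nat) :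
    LW rs = true ↔ ∃ j a, validMove rs j a ∧ LW (segNext rs j a) = false := by
  rw [LW]
  simp only [List.any_eq_true, List.mem_attach, true_and]
  constructor
  · rintro ⟨⟨j, hj⟩, ⟨⟨a, ha⟩, hf⟩⟩
    simp only [List.mem_range] at hj ha
    have hv : validMove rs j a := ⟨hj, ha⟩
    refine ⟨j, a, hv, ?_⟩
    have hlt : (segNext rs j a).sum < rs.sum := by have := seg_sum hv; omega
    simpa [hlt] using hf
  · rintro ⟨j, a, hv, hW⟩
    have hlt : (segNext rs j a).sum < rs.sum := by have := seg_sum hv; omega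
    refine ⟨⟨j, by simp [List.mem_range]; exact hv.1⟩, ⟨a, by simp [List.mem_range]; exact hv.2⟩, ?_⟩
    simp [hlt, hW]

theorem exists_run_bit {rs : List Nat} {d : Nat} (h : (xorg rs).testBit d = true) :
    ∃ j, j < rs.length ∧ (g (rs.getD j 0)).testBit d = true := by
  induction rs with
  | nil => simp [xorg] at h
  | cons k t ih =>
    rw [xorg_cons, Nat.testBit_xor] at h
    by_cases hk : (g k).testBit d = true
    · exact ⟨0, by simp, by simpa using hk⟩
    · have hk' : (g k).testBit d = false := by simpa using hk
      rw [hk'] at h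
      simp at h
      obtain ⟨j, hj, hb⟩ := ih h
      exact ⟨j + 1, by simpa using hj, by simpa using hb⟩


-- runs structure lemmas
theorem runs_cons_other {c : Char} (t : List Char) (hc : ¬ c = '+') :
    runs (c :: t) = 0 :: runs t := by simp [runs, hc]

theorem runs_exists : ∀ t : List Char, ∃ r rs, runs t = r :: rs := by
  intro t
  induction t with
  | nil => exact ⟨0, [], rfl⟩
  | cons c t ih =>
    obtain ⟨r, rs, hr⟩ := ih
    by_cases hc : c = '+'
    · subst hc; exact ⟨r + 1, rs, by simp [runs, hr]⟩
    · exact ⟨0, runs t, by simp [runs, hc]⟩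

theorem runs_cons_plus {t : List Char} {r : Nat} {rs : List Nat} (h : runs t = r :: rs) :
    runs ('+' :: t) = (r + 1) :: rs := by simp [runs, h]

theorem runs_head_pos {t : List Char} {r : Nat} {rs : List Nat}
    (h : runs t = r :: rs) (hpos : 0 < r) : ∃ t', t = '+' :: t' := by
  cases t with
  | nil => simp [runs] at h; omega
  | cons c t =>
    by_cases hc : c = '+'
    · exact ⟨t, by rw [hc]⟩
    · rw [runs_cons_other t hc] at h
      obtain ⟨h1, -⟩ := List.cons.injEq .. ▸ (List.cons.inj h)
      omega

-- movable / nextL structure lemmas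
theorem movable_cons_succ (c : Char) (t : List Char) (i : Nat) :
    movable (c :: t) (i + 1) = movable t i := by simp [movable]

theorem movable_cons_zero {c : Char} {t : List Char} :
    movable (c :: t) 0 = true ↔ c = '+' ∧ t[0]? = some '+' := by
  simp [movable]

theorem nextL_cons_succ (c : Char) (t : List Char) (i : Nat) :
    nextL (c :: t) (i + 1) = c :: nextL t i := by
  simp [nextL]

theorem nextL_zero (l : List Char) : nextL l 0 = '-' :: l.drop 2 := by simp [nextL]

-- segNext / validMove structure lemmas
theorem segNext_cons_succ (x : Nat) (rs : List Nat) (j a : Nat) :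
    segNext (x :: rs) (j + 1) a = x :: segNext rs j a := by
  simp [segNext]

theorem segNext_zero (k : Nat) (rs : List Nat) (a : Nat) :
    segNext (k :: rs) 0 a = a :: (k - 2 - a) :: rs := by
  simp [segNext]

theorem validMove_cons_succ {x : Nat} {rs : List Nat} {j a : Nat} :
    validMove (x :: rs) (j + 1) a ↔ validMove rs j a := by
  simp [validMove]

-- every string move is a segment move
theorem L1 : ∀ l : List Char, ∀ i, movable l i = true →
    ∃ j a, validMove (runs l) j a ∧ runs (nextL l i) = segNext (runs l) j a := by
  intro l
  induction l with
  | nil => intro i h; simp [movable] at h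
  | cons c t ih =>
    intro i h
    cases i with
    | zero =>
      obtain ⟨hc, ht⟩ := movable_cons_zero.mp h
      subst hc
      cases t with
      | nil => simp at ht
      | cons c2 t2 =>
        have hc2 : c2 = '+' := by simpa using ht
        subst hc2
        obtain ⟨r, rs, hr⟩ := runs_exists t2
        have h1 := runs_cons_plus hr
        have h2 := runs_cons_plus h1
        refine ⟨0, 0, ?_, ?_⟩
        · rw [h2]; exact ⟨by simp, by simp⟩
        · rw [nextL_zero, h2, segNext_zero]
          simp [List.drop, runs_cons_other _ (by decide : ¬ ('-' = '+')), hr]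
    | succ i =>
      have hm : movable t i = true := by rw [← movable_cons_succ c]; exact h
      obtain ⟨j, a, hv, hrn⟩ := ih i hm
      by_cases hc : c = '+'
      · subst hc
        obtain ⟨r, rs, hr⟩ := runs_exists t
        have h1 := runs_cons_plus hr
        rw [hr] at hv hrn
        cases j with
        | zero =>
          have har : a < r - 1 := by simpa [validMove] using hv.2
          rw [segNext_zero] at hrn
          refine ⟨0, a + 1, ?_, ?_⟩
          · rw [h1]; exact ⟨by simp, by simp <;> omega⟩
          · rw [nextL_cons_succ, runs_cons_plus hrn, h1, segNext_zero]
            simp <;> omega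
        | succ j' =>
          rw [segNext_cons_succ] at hrn
          refine ⟨j' + 1, a, ?_, ?_⟩
          · rw [h1]; exact validMove_cons_succ.mpr (validMove_cons_succ.mp hv)
          · rw [nextL_cons_succ, runs_cons_plus hrn, h1, segNext_cons_succ]
      · refine ⟨j + 1, a, ?_, ?_⟩
        · rw [runs_cons_other t hc]; exact validMove_cons_succ.mpr hv
        · rw [nextL_cons_succ, runs_cons_other _ hc, runs_cons_other t hc, hrn,
            segNext_cons_succ]

-- every segment move is realized by a string move
theorem L2 : ∀ l : List Char, ∀ j a, validMove (runs l) j a →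
    ∃ i, movable l i = true ∧ runs (nextL l i) = segNext (runs l) j a := by
  intro l
  induction l with
  | nil =>
    intro j a hv
    simp [runs, validMove] at hv
  | cons c t ih =>
    intro j a hv
    by_cases hc : c = '+'
    · subst hc
      obtain ⟨r, rs, hr⟩ := runs_exists t
      have h1 := runs_cons_plus hr
      rw [h1] at hv ⊢
      cases j with
      | zero =>
        have har : a < r := by have := hv.2; simp [List.getD] at this; omega
        cases a with
        | zero =>
          obtain ⟨t', rfl⟩ := runs_head_pos hr (by omega)
          obtain ⟨r', rs', hr'⟩ := runs_exists t'
          have h2 := runs_cons_plus hr'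
          rw [h2] at hr
          obtain ⟨hre, rfl⟩ := List.cons.inj hr
          refine ⟨0, by simp [movable], ?_⟩
          rw [nextL_zero, segNext_zero]
          simp [List.drop, runs_cons_other _ (by decide : ¬ ('-' = '+')), hr'] <;> omega
        | succ a' =>
          have hv' : validMove (runs t) 0 a' := by
            rw [hr]; exact ⟨by simp, by simp [List.getD]; omega⟩
          obtain ⟨i, hm, hrn⟩ := ih 0 a' hv'
          rw [hr, segNext_zero] at hrn
          refine ⟨i + 1, by rw [movable_cons_succ]; exact hm, ?_⟩
          rw [nextL_cons_succ, runs_cons_plus hrn, segNext_zero]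
          simp <;> omega
      | succ j' =>
        have hv' : validMove (runs t) (j' + 1) a := by
          rw [hr]; exact validMove_cons_succ.mpr (validMove_cons_succ.mp hv)
        obtain ⟨i, hm, hrn⟩ := ih (j' + 1) a hv'
        rw [hr, segNext_cons_succ] at hrn
        refine ⟨i + 1, by rw [movable_cons_succ]; exact hm, ?_⟩
        rw [nextL_cons_succ, runs_cons_plus hrn, segNext_cons_succ]
    · rw [runs_cons_other t hc] at hv ⊢
      cases j with
      | zero =>
        have := hv.2
        simp [List.getD] at this
      | succ j' =>
        obtain ⟨i, hm, hrn⟩ := ih j' a (validMove_cons_succ.mp hv)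
        refine ⟨i + 1, by rw [movable_cons_succ]; exact hm, ?_⟩
        rw [nextL_cons_succ, runs_cons_other _ hc, hrn, segNext_cons_succ]

theorem W_iff (l : List Char) :
    W l = true ↔ ∃ i, movable l i = true ∧ W (nextL l i) = false := by
  rw [W]
  simp only [List.any_eq_true, List.mem_attach, true_and]
  constructor
  · rintro ⟨⟨i, hi⟩, hf⟩
    by_cases h : movable l i = true
    · exact ⟨i, h, by simpa [h] using hf⟩
    · simp [h] at hf
  · rintro ⟨i, hm, hW⟩
    have hi : i ∈ List.range l.length := by
      have := movable_lt hm; simp [List.mem_range]; omega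
    exact ⟨⟨i, hi⟩, by simp [hm, hW]⟩

-- phase 2: the string game equals the segment game on its run decomposition
theorem W_eq_LW (l : List Char) : W l = LW (runs l) := by
  rw [Bool.eq_iff_iff, W_iff, LW_iff]
  constructor
  · rintro ⟨i, hm, hW⟩
    obtain ⟨j, a, hv, hrn⟩ := L1 l i hm
    refine ⟨j, a, hv, ?_⟩
    have hlen := movable_lt hm
    have := nextL_length hlen
    rw [← hrn, ← W_eq_LW (nextL l i)]
    exact hW
  · rintro ⟨j, a, hv, hLW⟩
    obtain ⟨i, hm, hrn⟩ := L2 l j a hv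
    refine ⟨i, hm, ?_⟩
    have hlen := movable_lt hm
    have := nextL_length hlen
    rw [W_eq_LW (nextL l i), hrn]
    exact hLW
termination_by l.length
decreasing_by all_goals omega

-- phase 3: Sprague–Grundy for the segment game
theorem LW_eq_xorg (rs : List Nat) : LW rs = decide (xorg rs ≠ 0) := by
    by_cases hx : xorg rs = 0
    · -- every move leads to a nonzero xor, so LW rs = false
      simp only [hx, ne_eq, not_true_eq_false, decide_false]
      rw [← Bool.not_eq_true, LW_iff]
      rintro ⟨j, a, hv, hLW⟩
      have hsum := seg_sum hv
      have h2 := LW_eq_xorg (segNext rs j a)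
      rw [hLW] at h2
      have hxn : xorg (segNext rs j a) ≠ 0 := by
        rw [seg_xorg hv, hx]
        simp only [Nat.zero_xor]
        intro h0
        rw [Nat.xor_eq_zero_iff] at h0
        exact g_not_mem_gmoves _ (h0 ▸ mem_gmoves.mpr ⟨a, hv.2, rfl⟩)
      simp [hxn] at h2
    · -- find the winning move via the most significant bit of the xor
      simp only [hx, ne_eq, not_false_eq_true, decide_true]
      obtain ⟨d, hd, hmax⟩ := Nat.exists_most_significant_bit hx
      obtain ⟨j, hj, hbit⟩ := exists_run_bit hd
      set k := rs.getD j 0 with hk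
      set t := g k ^^^ xorg rs with ht
      have htlt : t < g k := by
        apply Nat.lt_of_testBit d
        · rw [ht, Nat.testBit_xor, hbit, hd]; rfl
        · exact hbit
        · intro j' hj'
          rw [ht, Nat.testBit_xor, hmax j' hj']
          simp
      obtain ⟨a, ha, hga⟩ := mem_gmoves.mp (lt_g_mem_gmoves htlt)
      have hv : validMove rs j a := ⟨hj, by omega⟩
      rw [LW_iff]
      refine ⟨j, a, hv, ?_⟩
      have hxn : xorg (segNext rs j a) = 0 := by
        rw [seg_xorg hv, ← hk, hga, ht]
        simp [Nat.xor_comm, Nat.xor_self]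
      have hsum := seg_sum hv
      have h2 := LW_eq_xorg (segNext rs j a)
      simpa [hxn] using h2
termination_by rs.sum
decreasing_by
  · omega
  · omega

theorem g_zero : g 0 = 0 := by
  rw [g_eq]
  have h : gmoves 0 = [] := by simp [gmoves]
  rw [h, mexFrom]
  simp

theorem g_one : g 1 = 0 := by
  rw [g_eq]
  have h : gmoves 1 = [] := by simp [gmoves]
  rw [h, mexFrom]
  simp

-- the run-collecting foldl of the port computes `runs`
theorem runs_foldl : ∀ (l : List Char) (acc : List Nat) (cur r : Nat) (rs : List Nat),
    runs l = r :: rs →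
    (l.foldl (fun (p : List Nat × Nat) c =>
        if c == '+' then (p.1, p.2 + 1) else (p.1 ++ [p.2], 0)) (acc, cur)).1 ++
      [(l.foldl (fun (p : List Nat × Nat) c =>
        if c == '+' then (p.1, p.2 + 1) else (p.1 ++ [p.2], 0)) (acc, cur)).2] =
      acc ++ (cur + r) :: rs := by
  intro l
  induction l with
  | nil =>
    intro acc cur r rs h
    simp [runs] at h
    obtain ⟨rfl, rfl⟩ := h
    simp
  | cons c t ih =>
    intro acc cur r rs h
    obtain ⟨r', rs', hr⟩ := runs_exists t
    by_cases hc : c = '+'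
    · subst hc
      rw [runs_cons_plus hr] at h
      obtain ⟨rfl, rfl⟩ := List.cons.inj h
      simp only [List.foldl_cons, beq_self_eq_true, if_true]
      rw [ih acc (cur + 1) r' rs' hr]
      have : cur + 1 + r' = cur + (r' + 1) := by omega
      rw [this]
    · rw [runs_cons_other t hc] at h
      obtain ⟨rfl, rfl⟩ := List.cons.inj h
      have hb : (c == '+') = false := by simp [hc]
      simp only [List.foldl_cons, hb, Bool.false_eq_true, if_false]
      rw [ih (acc ++ [cur]) 0 r' rs' hr, hr]
      simp

-- the grundy DP table of the port agrees with g
theorem table_inv (m : Nat) : ∀ k, k ≤ m - 1 →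
    (((List.range' 2 k).foldl
        (fun g n =>
          g.set n (mexFrom (PySem.Set.ofList
            ((List.range (n - 1)).map fun a => (g.getD a 0) ^^^ (g.getD (n - 2 - a) 0))) 0))
        (List.replicate (m + 1) 0)).length = m + 1 ∧
      ∀ p, ((List.range' 2 k).foldl
        (fun g n =>
          g.set n (mexFrom (PySem.Set.ofList
            ((List.range (n - 1)).map fun a => (g.getD a 0) ^^^ (g.getD (n - 2 - a) 0))) 0))
        (List.replicate (m + 1) 0)).getD p 0 = if p < 2 + k then g p else 0) := by
  intro k
  induction k with
  | zero =>
    intro hk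
    refine ⟨by simp, ?_⟩
    intro p
    rw [List.range'_zero, List.foldl_nil]
    have h0 : (List.replicate (m + 1) (0 : Nat)).getD p 0 = 0 := by
      rcases Nat.lt_or_ge p (m + 1) with h | h
      · exact List.getD_replicate _ h
      · rw [List.getD_eq_getElem?_getD, List.getElem?_eq_none (by simpa using h)]
        rfl
    rw [h0]
    rcases Nat.lt_or_ge p 2 with h | h
    · interval_cases p
      · simp [g_zero]
      · simp [g_one]
    · simp [Nat.not_lt_of_ge h]
  | succ k ih =>
    intro hk
    obtain ⟨hlen, hval⟩ := ih (by omega)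
    rw [List.range'_concat, List.foldl_append]
    simp only [List.foldl_cons, List.foldl_nil]
    set T := (List.range' 2 k).foldl _ (List.replicate (m + 1) 0) with hT
    have hn : 2 + 1 * k = 2 + k := by omega
    rw [hn]
    set n := 2 + k with hndef
    have hseen : ((List.range (n - 1)).map fun a => (T.getD a 0) ^^^ (T.getD (n - 2 - a) 0)) =
        gmoves n := by
      rw [gmoves]
      apply List.map_congr_left
      intro a ha
      simp only [List.mem_range] at ha
      rw [hval a, hval (n - 2 - a), if_pos (by omega), if_pos (by omega)]
    have hmex : mexFrom (PySem.Set.ofList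
        ((List.range (n - 1)).map fun a => (T.getD a 0) ^^^ (T.getD (n - 2 - a) 0))) 0 = g n := by
      rw [hseen, g_eq n]
      exact mexFrom_congr _ _ (fun x => PySem.Set.mem_ofList _ x) 0
    refine ⟨by simp [hlen], ?_⟩
    intro p
    rw [List.getD_eq_getElem?_getD, List.getElem?_set]
    by_cases hp : n = p
    · subst hp
      rw [if_pos rfl, if_pos (by rw [hlen]; omega), hmex]
      simp only [Option.getD_some]
      rw [if_pos (by omega)]
    · rw [if_neg hp, ← List.getD_eq_getElem?_getD, hval p]
      by_cases h2 : p < 2 + k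
      · rw [if_pos h2, if_pos (by omega)]
      · rw [if_neg h2, if_neg (by omega)]

theorem foldl_xor_eq (T : List Nat) :
    ∀ (rs : List Nat) (x : Nat), (∀ r ∈ rs, T.getD r 0 = g r) →
      rs.foldl (fun x r => x ^^^ T.getD r 0) x = x ^^^ xorg rs := by
  intro rs
  induction rs with
  | nil => intro x _; simp [xorg]
  | cons r t ih =>
    intro x h
    simp only [List.foldl_cons]
    rw [ih (x ^^^ T.getD r 0) (fun r' hr' => h r' (List.mem_cons_of_mem _ hr')),
      h r (List.mem_cons_self ..), xorg_cons, Nat.xor_assoc]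

-- B's port computes the xor of grundy numbers of the runs
theorem alt_eq : ∀ s, canWin_alt s = decide (xorg (runs s.toList) ≠ 0) := by
  intro s
  rw [canWin_alt]
  obtain ⟨r, rs0, hr⟩ := runs_exists s.toList
  have hruns := runs_foldl s.toList [] 0 r rs0 hr
  simp only [List.nil_append, Nat.zero_add] at hruns
  rw [hruns, ← hr]
  set rs := runs s.toList with hrs
  have hne : rs ≠ [] := by rw [hr]; simp
  obtain ⟨mx, hmx⟩ : ∃ mx, PySem.List.max? rs (fun x => x) = some mx := by
    cases hq : PySem.List.max? rs (fun x => x) with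
    | none => exact absurd ((PySem.List.max?_eq_none_iff rs _).mp hq) hne
    | some mx => exact ⟨mx, rfl⟩
  simp only [hmx, Option.getD_some]
  have hbound : ∀ y ∈ rs, y ≤ mx := by
    intro y hy
    exact PySem.List.max?_isMax hmx y hy
  obtain ⟨hlen, hval⟩ := table_inv mx (mx - 1) (by omega)
  rw [foldl_xor_eq]
  · simp [Nat.zero_xor]
  · intro p hp
    rw [hval p, if_pos (by have := hbound p hp; omega)]

theorem take2_eq (xs : List Char) :
    xs.take 2 = ['+', '+'] ↔ xs[0]? = some '+' ∧ xs[1]? = some '+' := by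
  match xs with
  | [] => simp
  | [a] => simp
  | a :: b :: r => simp [List.take]

theorem movable_iff_slice {l : List Char} {i : Nat} (h : i < l.length) :
    PySem.List.slice l (some (i : Int)) (some ((i : Int) + 2)) = ['+', '+'] ↔
      movable l i = true := by
  have hc : ((i : Int) + 2) = ((i + 2 : Nat) : Int) := by push_cast; ring
  rw [hc, PySem.List.slice_natCast]
  have h2 : i + 2 - i = 2 := by omega
  rw [h2, take2_eq]
  simp [movable, List.getElem?_drop]

theorem new_eq_nextL (l : List Char) (i : Nat) :
    PySem.List.slice l none (some (i : Int)) ++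
      '-' :: PySem.List.slice l (some ((i : Int) + 2)) none = nextL l i := by
  have hc : ((i : Int) + 2) = ((i + 2 : Nat) : Int) := by push_cast; ring
  rw [hc, PySem.List.slice_to_natCast, PySem.List.slice_from_natCast, nextL]

-- phase 0: the memoized search computes W
mutual
theorem canA_ok (l : List Char) (m : PySem.Dict (List Char) Bool) (hm : goodM m) :
    (canA l m).1 = W l ∧ goodM (canA l m).2 := by
  rw [canA]
  cases hg : PySem.Dict.get? m l with
  | some b => exact ⟨hm l b hg, hm⟩
  | none =>
    obtain ⟨h1, h2⟩ := anyA_ok l 0 m hm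
    have hW : (anyA l 0 m).1 = W l := by
      rw [Bool.eq_iff_iff, h1, W_iff]
      constructor
      · rintro ⟨j, -, hmv, hw⟩; exact ⟨j, hmv, hw⟩
      · rintro ⟨j, hmv, hw⟩; exact ⟨j, Nat.zero_le _, hmv, hw⟩
    refine ⟨hW, ?_⟩
    intro t b hgt
    by_cases hteq : t = l
    · subst hteq
      rw [PySem.Dict.get?_insert_self] at hgt
      cases hgt
      exact hW
    · rw [PySem.Dict.get?_insert_of_ne _ _ hteq] at hgt
      exact h2 t b hgt
  termination_by (l.length, 1, 0)
  decreasing_by exact Prod.Lex.right _ (Prod.Lex.left _ _ (by omega))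

theorem anyA_ok (l : List Char) (i : Nat) (m : PySem.Dict (List Char) Bool) (hm : goodM m) :
    ((anyA l i m).1 = true ↔ ∃ j, i ≤ j ∧ movable l j = true ∧ W (nextL l j) = false) ∧
      goodM (anyA l i m).2 := by
  rw [anyA]
  by_cases h : i < l.length
  · rw [dif_pos h]
    by_cases hs : PySem.List.slice l (some (i : Int)) (some ((i : Int) + 2)) = ['+', '+']
    · rw [dif_pos hs]
      rw [new_eq_nextL]
      have hmov : movable l i = true := (movable_iff_slice h).mp hs
      obtain ⟨hc1, hc2⟩ := canA_ok (PySem.List.slice l none (some (i : Int)) ++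
        '-' :: PySem.List.slice l (some ((i : Int) + 2)) none) m hm
      rw [new_eq_nextL] at hc1 hc2
      cases hq : (canA (nextL l i) m).1
      · simp only [hq, Bool.false_eq_true, if_false]
        refine ⟨?_, hc2⟩
        simp only [true_iff]
        exact ⟨i, le_refl _, hmov, by rw [← hc1, hq]⟩
      · simp only [hq, if_true]
        obtain ⟨h1', h2'⟩ := anyA_ok l (i + 1) _ hc2
        refine ⟨?_, h2'⟩
        rw [h1']
        constructor
        · rintro ⟨j, hj, hmv, hw⟩; exact ⟨j, by omega, hmv, hw⟩
        · rintro ⟨j, hj, hmv, hw⟩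
          rcases Nat.eq_or_lt_of_le hj with rfl | hlt
          · rw [← hc1, hq] at hw; cases hw
          · exact ⟨j, by omega, hmv, hw⟩
    · rw [dif_neg hs]
      obtain ⟨h1', h2'⟩ := anyA_ok l (i + 1) m hm
      refine ⟨?_, h2'⟩
      rw [h1']
      constructor
      · rintro ⟨j, hj, hmv, hw⟩; exact ⟨j, by omega, hmv, hw⟩
      · rintro ⟨j, hj, hmv, hw⟩
        rcases Nat.eq_or_lt_of_le hj with rfl | hlt
        · exact absurd ((movable_iff_slice h).mpr hmv) hs
        · exact ⟨j, by omega, hmv, hw⟩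
  · rw [dif_neg h]
    refine ⟨?_, hm⟩
    simp only [Bool.false_eq_true, false_iff]
    rintro ⟨j, hj, hmv, -⟩
    have := movable_lt hmv
    omega
  termination_by (l.length, 0, l.length - i)
  decreasing_by
    · have hc : ((i : Int) + 2) = ((i + 2 : Nat) : Int) := by push_cast; ring
      rw [hc, PySem.List.slice_natCast] at hs
      have hi2 : i + 2 ≤ l.length := by
        have h2 := congrArg List.length hs
        simp only [List.length_take, List.length_drop, List.length_cons, List.length_nil] at h2
        omega
      rw [hc, PySem.List.slice_to_natCast, PySem.List.slice_from_natCast]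
      apply Prod.Lex.left
      simp only [List.length_append, List.length_cons, List.length_drop, List.length_take]
      omega
    · exact Prod.Lex.right _ (Prod.Lex.right _ (by omega))
    · exact Prod.Lex.right _ (Prod.Lex.right _ (by omega))
end

-- ===== VERDICT (by name: the statement is the Claim_ definition above) =====
theorem canWin_spec : Claim_equal_canWin := by
  intro s _
  unfold Spec_canWin canWin
  have h0 : goodM PySem.Dict.empty := by intro t b h; simp [PySem.Dict.get?, PySem.Dict.empty] at h
  rw [(canA_ok s.toList PySem.Dict.empty h0).1, W_eq_LW, LW_eq_xorg, alt_eq]
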